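-- pv_equiv track=rewrite | github.com/akakss225/Python_tutorial | test.py | solution
-- ===== SOURCE A (Python) =====
-- def solution(p):
--     answer = 0
--     answer = 0
--     dp = [False] * len(p)
--     for i in range(len(p)):
--         idx = [i]
--         check = 0
--         while idx:
--             cur = idx.pop()
--             if dp[cur] == True:
--                 check = 1
--                 break
--             if p[cur] == "<":
--                 next_idx = cur - 1
--                 if next_idx == -1:
--                     check = 1
--                     break
--                 else:
--                     if p[next_idx] == ">":
--                         break
--                     else:
--                         idx.append(next_idx)
--             else:
--                 next_idx = cur + 1
--                 if next_idx == len(p):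
--                     check = 1
--                     break
--                 else:
--                     if p[next_idx] == "<":
--                         break
--                     else:
--                         idx.append(next_idx)
--         if check == 1:
--             answer += 1
--             dp[i] = True
--
--     return answer
-- ===== SOURCE B (Python) =====
-- def solution(p):
--     lead = 0
--     while lead < len(p) and p[lead] == '<':
--         lead += 1
--     trail = 0
--     while trail < len(p) and p[len(p) - 1 - trail] != '<':
--         trail += 1
--     return lead + trail
-- ===== Notes on version B (the rewrite author's own statement) =====
-- stated objective: faster
-- what changed: Replaces the per-index simulated walk with memo array (quadratic in the worst case) by two boundary scans: an index escapes iff it lies in the leading run of '<' or the trailing run of non-'<' characters, so B just measures those two runs.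
import Mathlib
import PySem

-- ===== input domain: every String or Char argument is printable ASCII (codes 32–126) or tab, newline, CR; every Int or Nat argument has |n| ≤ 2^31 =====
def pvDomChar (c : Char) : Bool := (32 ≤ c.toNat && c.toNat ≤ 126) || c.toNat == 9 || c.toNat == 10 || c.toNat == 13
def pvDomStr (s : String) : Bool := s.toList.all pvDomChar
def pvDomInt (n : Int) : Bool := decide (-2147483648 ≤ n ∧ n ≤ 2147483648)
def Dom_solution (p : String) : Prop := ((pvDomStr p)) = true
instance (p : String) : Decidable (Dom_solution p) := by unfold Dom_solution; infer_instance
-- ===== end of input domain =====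

-- B replaces A's per-index simulated walk (with memoisation) by two boundary-run scans: an index escapes iff it is in the leading '<' run or the trailing non-'<' run (objective: faster).


-- ===== PORT A =====
-- the inner 'while idx:' loop; fuel (called with length+2, always sufficient) only makes it total,
-- and the out-of-range defaults of pyGetD are never reached (A never indexes out of range).
def solWhile (l : List Char) (dp : List Bool) : List Int → Nat → Int
  | _, 0 => 0
  | idx, fuel + 1 =>
    match PySem.List.pop? idx (-1) with
    | none => 0
    | some (cur, rest) =>
      if PySem.List.pyGetD dp cur false = true then 1
      else if PySem.List.pyGetD l cur ' ' = '<' then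
        if cur - 1 = -1 then 1
        else if PySem.List.pyGetD l (cur - 1) ' ' = '>' then 0
        else solWhile l dp (rest ++ [cur - 1]) fuel
      else
        if cur + 1 = (l.length : Int) then 1
        else if PySem.List.pyGetD l (cur + 1) ' ' = '<' then 0
        else solWhile l dp (rest ++ [cur + 1]) fuel

def solution (p : String) : Int :=
  let l := p.toList
  let st := (PySem.List.pyRange 0 l.length 1).foldl
    (fun (st : Int × List Bool) i =>
      let check := solWhile l st.2 [i] (l.length + 2)
      if check = 1 then (st.1 + 1, PySem.List.pySetD st.2 i true) else st)
    (0, List.replicate l.length false)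
  st.1

-- ===== PORT B =====
-- 'while lead < len(p) and p[lead] == "<"' = scan from the front
def leadRun : List Char → Int
  | [] => 0
  | c :: rest => if c = '<' then 1 + leadRun rest else 0

-- 'while trail < len(p) and p[len(p)-1-trail] != "<"' = scan from the back
def trailRun : List Char → Int
  | [] => 0
  | c :: rest => if c ≠ '<' then 1 + trailRun rest else 0

def solution_alt (p : String) : Int := leadRun p.toList + trailRun p.toList.reverse

-- ===== PRECONDITION & SPEC =====
def Spec_solution (p : String) (out : Int) : Prop := out = solution_alt p
instance (p : String) (out : Int) : Decidable (Spec_solution p out) := by unfold Spec_solution; infer_instance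

-- ===== CLAIM (what is proved, stated in full; the proofs are below) =====
def Claim_equal_solution : Prop := ∀ (p : String), Dom_solution p → Spec_solution p (solution p)

-- ===== LEMMAS AND PROOFS =====

theorem solWhile_step (l : List Char) (dp : List Bool) (cur f : Nat) (h : cur < l.length) :
    solWhile l dp [(cur : Int)] (f+1) =
      if dp[cur]?.getD false = true then 1
      else if l[cur]?.getD ' ' = '<' then
        if cur = 0 then 1
        else if l[cur-1]?.getD ' ' = '>' then 0
        else solWhile l dp [((cur-1 : Nat) : Int)] f
      else
        if cur + 1 = l.length then 1
        else if l[cur+1]?.getD ' ' = '<' then 0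
        else solWhile l dp [((cur+1 : Nat) : Int)] f := by
  have hpop : PySem.List.pop? [(cur : Int)] (-1) = some ((cur : Int), []) := by
    simp [PySem.List.pop?, PySem.List.pyIdx?]
  simp only [solWhile, hpop, PySem.List.pyGetD_natCast, List.getD_eq_getElem?_getD,
    List.nil_append]
  by_cases hdp : dp[cur]?.getD false = true
  · simp only [hdp, if_true]
  · simp only [hdp, if_false]
    by_cases hc : l[cur]?.getD ' ' = '<'
    · simp only [hc, if_true]
      by_cases h0 : cur = 0
      · subst h0; norm_num
      · have e1 : (((cur : Int) - 1 = -1)) = False := by simp; omega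
        simp only [e1, if_false]
        have e2 : ((cur : Int) - 1) = ((cur - 1 : Nat) : Int) := by omega
        simp only [e2, PySem.List.pyGetD_natCast, List.getD_eq_getElem?_getD, if_neg h0]
    · simp only [hc, if_false]
      have e3 : ((cur : Int) + 1) = ((cur + 1 : Nat) : Int) := by omega
      simp only [e3, PySem.List.pyGetD_natCast, List.getD_eq_getElem?_getD, Nat.cast_inj]

theorem getDchar (l : List Char) (cur : Nat) (h : cur < l.length) :
    l[cur]?.getD ' ' = l[cur] := by
  simp [List.getElem?_eq_getElem h]

def escB (l : List Char) (j : Nat) : Bool :=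
  (l.take (j+1)).all (fun c => c == '<') || (l.drop j).all (fun c => c != '<')

theorem all_take_iff (P : Char → Bool) (l : List Char) (m : Nat) :
    ((l.take m).all P = true) ↔ ∀ j, (hj : j < l.length) → j < m → P l[j] = true := by
  simp only [List.all_eq_true]
  constructor
  · intro h j hj hm
    exact h l[j] (List.mem_take_iff_getElem.2 ⟨j, by omega, by simp⟩)
  · intro h x hx
    rcases List.mem_take_iff_getElem.1 hx with ⟨j, hj, rfl⟩
    exact h j (by omega) (by omega)

theorem all_drop_iff (P : Char → Bool) (l : List Char) (m : Nat) :
    ((l.drop m).all P = true) ↔ ∀ j, (hj : j < l.length) → m ≤ j → P l[j] = true := by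
  simp only [List.all_eq_true]
  constructor
  · intro h j hj hm
    have : l[j] ∈ l.drop m := by
      rw [List.mem_drop_iff_getElem]
      exact ⟨j - m, by omega, by congr 1; omega⟩
    exact h _ this
  · intro h x hx
    rcases List.mem_drop_iff_getElem.1 hx with ⟨j, hj, rfl⟩
    exact h (m + j) (by omega) (by omega)

theorem take_all_false (l : List Char) (m j : Nat) (hj : j < l.length) (hjm : j < m)
    (hne : l[j] ≠ '<') : (l.take m).all (fun c => c == '<') = false := by
  rw [Bool.eq_false_iff]
  intro hcontra
  have := (all_take_iff _ l m).1 hcontra j hj hjm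
  simp [hne] at this

theorem drop_all_false (l : List Char) (m j : Nat) (hj : j < l.length) (hjm : m ≤ j)
    (heq : l[j] = '<') : (l.drop m).all (fun c => c != '<') = false := by
  rw [Bool.eq_false_iff]
  intro hcontra
  have := (all_drop_iff _ l m).1 hcontra j hj hjm
  simp [heq] at this

theorem walkL (l : List Char) (dp : List Bool)
    (Hdp : ∀ j, j < l.length → dp.getD j false = true → escB l j = true) :
    ∀ (cur fuel : Nat), (h : cur < l.length) → l[cur] = '<' → cur + 2 ≤ fuel →
    solWhile l dp [(cur : Int)] fuel
      = (if (l.take (cur+1)).all (fun c => c == '<') then 1 else 0) := by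
  intro cur
  induction cur with
  | zero =>
    intro fuel h hc hf
    match fuel, hf with
    | f + 1, _ =>
    rw [solWhile_step l dp 0 f h]
    have htake : (l.take 1).all (fun c => c == '<') = true := by
      rw [all_take_iff]
      intro j hj hj1
      have : j = 0 := by omega
      subst this; simp [hc]
    by_cases hdp : dp[0]?.getD false = true
    · rw [if_pos hdp, htake]; simp
    · rw [if_neg hdp, if_pos (by rw [getDchar l 0 h]; exact hc), if_pos rfl, htake]; simp
  | succ c ih =>
    intro fuel h hc hf
    match fuel, hf with
    | f + 1, _ =>
    rw [solWhile_step l dp (c+1) f h]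
    have hcl : c < l.length := by omega
    have hdropF : (l.drop (c+1)).all (fun c => c != '<') = false :=
      drop_all_false l (c+1) (c+1) h (le_refl _) hc
    by_cases hdp : dp[c+1]?.getD false = true
    · have hesc := Hdp (c+1) h (by rw [List.getD_eq_getElem?_getD]; exact hdp)
      have htake : (l.take (c+2)).all (fun c => c == '<') = true := by
        unfold escB at hesc; rw [hdropF] at hesc; simpa using hesc
      rw [if_pos hdp, htake]; simp
    · rw [if_neg hdp, if_pos (by rw [getDchar l (c+1) h]; exact hc), if_neg (Nat.succ_ne_zero c)]
      have hsub : c + 1 - 1 = c := rfl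
      rw [hsub, getDchar l c hcl]
      by_cases hprev : l[c] = '<'
      · rw [if_neg (by rw [hprev]; decide), ih f hcl hprev (by omega)]
        have hiff : (l.take (c+1+1)).all (fun c => c == '<') = (l.take (c+1)).all (fun c => c == '<') := by
          by_cases ht : (l.take (c+1)).all (fun c => c == '<') = true
          · rw [ht, all_take_iff]
            intro j hj hj2
            by_cases hj1 : j < c + 1
            · exact (all_take_iff _ l (c+1)).1 ht j hj hj1
            · have : j = c + 1 := by omega
              subst this; simp [hc]
          · rw [Bool.not_eq_true] at ht
            rw [ht, Bool.eq_false_iff]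
            intro hcontra
            have : (l.take (c+1)).all (fun c => c == '<') = true := by
              rw [all_take_iff]; intro j hj hj1
              exact (all_take_iff _ l (c+2)).1 hcontra j hj (by omega)
            rw [this] at ht; cases ht
        rw [hiff]
      · have htakeF : (l.take (c+1+1)).all (fun c => c == '<') = false :=
          take_all_false l (c+2) c hcl (by omega) hprev
        by_cases hgt : l[c] = '>'
        · rw [if_pos hgt, htakeF]; simp
        · rw [if_neg hgt]
          match f, (show 2 ≤ f by omega) with
          | f' + 1, _ =>
          rw [solWhile_step l dp c f' hcl]
          have hdpc : ¬ (dp[c]?.getD false = true) := by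
            intro hdpc
            have hesc := Hdp c hcl (by rw [List.getD_eq_getElem?_getD]; exact hdpc)
            unfold escB at hesc
            rcases Bool.or_eq_true_iff.1 hesc with h1 | h1
            · have := (all_take_iff _ l (c+1)).1 h1 c hcl (by omega)
              simp [hprev] at this
            · have := (all_drop_iff _ l c).1 h1 (c+1) h (by omega)
              simp [hc] at this
          rw [if_neg hdpc, if_neg (by rw [getDchar l c hcl]; exact hprev),
            if_neg (show ¬ (c + 1 = l.length) by omega),
            if_pos (by rw [getDchar l (c+1) h]; exact hc), htakeF]
          simp

theorem walkR (l : List Char) (dp : List Bool)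
    (Hdp : ∀ j, j < l.length → dp.getD j false = true → escB l j = true) :
    ∀ (fuel cur : Nat), (h : cur < l.length) → l[cur] ≠ '<' → l.length - cur + 1 ≤ fuel →
    solWhile l dp [(cur : Int)] fuel
      = (if (l.drop cur).all (fun c => c != '<') then 1 else 0) := by
  intro fuel
  induction fuel with
  | zero => intro cur h hc hf; omega
  | succ f ih =>
    intro cur h hc hf
    rw [solWhile_step l dp cur f h]
    have htakeF : (l.take (cur+1)).all (fun c => c == '<') = false :=
      take_all_false l (cur+1) cur h (by omega) hc
    by_cases hdp : dp[cur]?.getD false = true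
    · have hesc := Hdp cur h (by rw [List.getD_eq_getElem?_getD]; exact hdp)
      have hdrop : (l.drop cur).all (fun c => c != '<') = true := by
        unfold escB at hesc; rw [htakeF] at hesc; simpa using hesc
      rw [if_pos hdp, hdrop]; simp
    · rw [if_neg hdp, if_neg (by rw [getDchar l cur h]; exact hc)]
      by_cases hend : cur + 1 = l.length
      · rw [if_pos hend]
        have hdrop : (l.drop cur).all (fun c => c != '<') = true := by
          rw [all_drop_iff]
          intro j hj hjm
          have : j = cur := by omega
          subst this; simp [hc]
        rw [hdrop]; simp
      · rw [if_neg hend]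
        have hlt : cur + 1 < l.length := by omega
        rw [getDchar l (cur+1) hlt]
        by_cases hnext : l[cur+1] = '<'
        · rw [if_pos hnext]
          have hdropF : (l.drop cur).all (fun c => c != '<') = false :=
            drop_all_false l cur (cur+1) hlt (by omega) hnext
          rw [hdropF]; simp
        · rw [if_neg hnext, ih (cur+1) hlt hnext (by omega)]
          have hiff : (l.drop (cur+1)).all (fun c => c != '<') = (l.drop cur).all (fun c => c != '<') := by
            by_cases hd : (l.drop cur).all (fun c => c != '<') = true
            · rw [hd, all_drop_iff]
              intro j hj hjm
              exact (all_drop_iff _ l cur).1 hd j hj (by omega)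
            · rw [Bool.not_eq_true] at hd
              rw [hd, Bool.eq_false_iff]
              intro hcontra
              have : (l.drop cur).all (fun c => c != '<') = true := by
                rw [all_drop_iff]
                intro j hj hjm
                by_cases hj1 : cur + 1 ≤ j
                · exact (all_drop_iff _ l (cur+1)).1 hcontra j hj hj1
                · have : j = cur := by omega
                  subst this; simp [hc]
              rw [this] at hd; cases hd
          rw [hiff]

theorem walk (l : List Char) (dp : List Bool)
    (Hdp : ∀ j, j < l.length → dp.getD j false = true → escB l j = true)
    (cur : Nat) (h : cur < l.length) :
    solWhile l dp [(cur : Int)] (l.length + 2) = (if escB l cur then 1 else 0) := by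
  by_cases hc : l[cur] = '<'
  · rw [walkL l dp Hdp cur (l.length + 2) h hc (by omega)]
    unfold escB
    rw [drop_all_false l cur cur h (le_refl _) hc]
    simp
  · rw [walkR l dp Hdp (l.length + 2) cur h hc (by omega)]
    unfold escB
    rw [take_all_false l (cur+1) cur h (by omega) hc]
    simp

theorem take_all_iff_takeWhile (P : Char → Bool) :
    ∀ (l : List Char) (m : Nat), m ≤ l.length →
    (((l.take m).all P = true) ↔ m ≤ (l.takeWhile P).length) := by
  intro l
  induction l with
  | nil => intro m hm; simp at hm; subst hm; simp
  | cons c rest ih =>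
    intro m hm
    cases m with
    | zero => simp
    | succ m' =>
      simp only [List.take_succ_cons, List.all_cons, List.takeWhile_cons]
      by_cases hp : P c = true
      · simp only [hp, if_true, Bool.true_and, List.length_cons]
        rw [ih m' (by simpa using hm)]
        omega
      · rw [Bool.not_eq_true] at hp
        simp [hp]

theorem leadRun_eq : ∀ (l : List Char),
    leadRun l = ((l.takeWhile (fun c => c == '<')).length : Int) := by
  intro l
  induction l with
  | nil => simp [leadRun]
  | cons c rest ih =>
    by_cases hc : c = '<'
    · simp [leadRun, hc, List.takeWhile_cons, ih]; omega
    · simp [leadRun, hc, List.takeWhile_cons]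

theorem trailRun_eq : ∀ (l : List Char),
    trailRun l = ((l.takeWhile (fun c => c != '<')).length : Int) := by
  intro l
  induction l with
  | nil => simp [trailRun]
  | cons c rest ih =>
    by_cases hc : c = '<'
    · simp [trailRun, hc, List.takeWhile_cons]
    · simp [trailRun, hc, List.takeWhile_cons, ih]; omega

theorem escB_eq (l : List Char) (j : Nat) (hj : j < l.length) :
    escB l j = (decide (j < (l.takeWhile (fun c => c == '<')).length)
             || decide (l.length - (l.reverse.takeWhile (fun c => c != '<')).length ≤ j)) := by
  unfold escB
  have h1 : (l.take (j+1)).all (fun c => c == '<')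
      = decide (j < (l.takeWhile (fun c => c == '<')).length) := by
    by_cases h : (l.take (j+1)).all (fun c => c == '<') = true
    · rw [h]
      have := (take_all_iff_takeWhile _ l (j+1) (by omega)).1 h
      simp; omega
    · rw [Bool.not_eq_true] at h
      rw [h]
      have : ¬ (j + 1 ≤ (l.takeWhile (fun c => c == '<')).length) := by
        intro hc
        rw [← take_all_iff_takeWhile _ l (j+1) (by omega)] at hc
        rw [hc] at h; cases h
      simp; omega
  have h2 : (l.drop j).all (fun c => c != '<')
      = decide (l.length - (l.reverse.takeWhile (fun c => c != '<')).length ≤ j) := by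
    have hrev : (l.drop j).all (fun c => c != '<')
        = (l.reverse.take (l.length - j)).all (fun c => c != '<') := by
      rw [← List.all_reverse, List.reverse_drop]
    rw [hrev]
    have hlen : l.length - j ≤ l.reverse.length := by simp
    have hkr : (l.reverse.takeWhile (fun c => c != '<')).length ≤ l.length := by
      have := (List.takeWhile_sublist (l := l.reverse) (fun c => c != '<')).length_le
      simpa using this
    by_cases h : (l.reverse.take (l.length - j)).all (fun c => c != '<') = true
    · rw [h]
      have := (take_all_iff_takeWhile _ l.reverse (l.length - j) hlen).1 h
      simp; omega
    · rw [Bool.not_eq_true] at h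
      rw [h]
      have : ¬ (l.length - j ≤ (l.reverse.takeWhile (fun c => c != '<')).length) := by
        intro hc
        rw [← take_all_iff_takeWhile _ l.reverse (l.length - j) hlen] at hc
        rw [hc] at h; cases h
      simp; omega
  rw [h1, h2]

theorem count_two_runs (n a b : Nat) (ha : a ≤ n) (hb : b ≤ n) (hd : a + b ≤ n) :
    (List.range n).countP (fun j => decide (j < a) || decide (n - b ≤ j)) = a + b := by
  have hsplit : List.range n = List.range' 0 a ++ (List.range' a (n - b - a) ++ List.range' (n - b) b) := by
    have e1 : List.range' a (n - b - a) ++ List.range' (a + 1 * (n - b - a)) b = List.range' a ((n - b - a) + b) :=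
      List.range'_append
    have e2 : List.range' 0 a ++ List.range' (0 + 1 * a) (n - a) = List.range' 0 (a + (n - a)) :=
      List.range'_append
    have ha1 : a + 1 * (n - b - a) = n - b := by omega
    have ha2 : (n - b - a) + b = n - a := by omega
    rw [ha1, ha2] at e1
    rw [e1]
    have ha3 : (0 + 1 * a) = a := by omega
    have ha4 : a + (n - a) = n := by omega
    rw [ha3, ha4] at e2
    rw [e2, List.range_eq_range']
  rw [hsplit, List.countP_append, List.countP_append]

  have c1 : (List.range' 0 a).countP (fun j => decide (j < a) || decide (n - b ≤ j)) = a := by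
    have := List.countP_eq_length (l := List.range' 0 a)
      (p := fun j => decide (j < a) || decide (n - b ≤ j))
    rw [this.2, List.length_range']
    intro x hx
    rw [List.mem_range'] at hx
    rcases hx with ⟨i, hi, rfl⟩
    simp; omega
  have c2 : (List.range' a (n - b - a)).countP (fun j => decide (j < a) || decide (n - b ≤ j)) = 0 := by
    rw [List.countP_eq_zero]
    intro x hx
    rw [List.mem_range'] at hx
    rcases hx with ⟨i, hi, rfl⟩
    simp; omega
  have c3 : (List.range' (n - b) b).countP (fun j => decide (j < a) || decide (n - b ≤ j)) = b := by
    have := List.countP_eq_length (l := List.range' (n - b) b)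
      (p := fun j => decide (j < a) || decide (n - b ≤ j))
    rw [this.2, List.length_range']
    intro x hx
    rw [List.mem_range'] at hx
    rcases hx with ⟨i, hi, rfl⟩
    simp
  rw [c1, c2, c3]
  omega

def loopF (l : List Char) (st : Int × List Bool) (i : Int) : Int × List Bool :=
  let check := solWhile l st.2 [i] (l.length + 2)
  if check = 1 then (st.1 + 1, PySem.List.pySetD st.2 i true) else st

theorem solution_eq_loopF (p : String) :
    solution p = ((PySem.List.pyRange 0 (p.toList.length : Int) 1).foldl (loopF p.toList)
      (0, List.replicate p.toList.length false)).1 := rfl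

theorem fold_inv (l : List Char) : ∀ (m : Nat), m ≤ l.length →
    (((PySem.List.pyRange 0 (m:Int) 1).foldl (loopF l) (0, List.replicate l.length false)).1
        = ((List.range m).countP (fun j => escB l j) : Int))
  ∧ (((PySem.List.pyRange 0 (m:Int) 1).foldl (loopF l) (0, List.replicate l.length false)).2.length = l.length)
  ∧ (∀ j, j < l.length →
      (((PySem.List.pyRange 0 (m:Int) 1).foldl (loopF l) (0, List.replicate l.length false)).2).getD j false
        = (decide (j < m) && escB l j)) := by
  intro m
  induction m with
  | zero =>
    intro _
    rw [show ((0:Nat):Int) = 0 by rfl, PySem.List.pyRange_one_eq_nil (le_refl 0)]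
    refine ⟨by simp, by simp, ?_⟩
    intro j hj
    simp
  | succ m ih =>
    intro hm
    have hmn : m < l.length := by omega
    obtain ⟨ih1, ih2, ih3⟩ := ih (by omega)
    have hcast : ((m+1 : Nat) : Int) = (m : Int) + 1 := by push_cast; ring
    rw [hcast, PySem.List.pyRange_one_succ_right (by positivity), List.foldl_append]
    set st := (PySem.List.pyRange 0 (m:Int) 1).foldl (loopF l) (0, List.replicate l.length false) with hst
    have Hdp : ∀ j, j < l.length → st.2.getD j false = true → escB l j = true := by
      intro j hj h
      rw [ih3 j hj] at h
      exact (Bool.and_eq_true_iff.1 h).2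
    have hwalk := walk l st.2 Hdp m hmn
    simp only [List.foldl_cons, List.foldl_nil]
    unfold loopF
    rw [hwalk]
    by_cases hesc : escB l m = true
    · rw [hesc, if_pos rfl, if_pos rfl]
      refine ⟨?_, ?_, ?_⟩
      · simp only [ih1]
        rw [List.range_succ, List.countP_append]
        simp [hesc]
      · simp only [PySem.List.pySetD_natCast, List.length_set, ih2]
      · intro j hj
        simp only [PySem.List.pySetD_natCast]
        rw [List.getD_eq_getElem?_getD, List.getElem?_set]
        by_cases hje : m = j
        · subst hje
          rw [if_pos rfl, if_pos (by omega : m < st.2.length)]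
          simp [hesc]
        · rw [if_neg hje, ← List.getD_eq_getElem?_getD, ih3 j hj]
          have : (decide (j < m + 1)) = (decide (j < m)) := by
            simp only [decide_eq_decide]; omega
          rw [this]
    · rw [Bool.not_eq_true] at hesc
      rw [hesc, if_neg (by decide)]
      refine ⟨?_, ih2, ?_⟩
      · rw [ih1, List.range_succ, List.countP_append]
        simp [hesc]
      · intro j hj
        rw [ih3 j hj]
        by_cases hje : j = m
        · subst hje
          rw [hesc]
          simp
        · have : (decide (j < m + 1)) = (decide (j < m)) := by
            simp only [decide_eq_decide]; omega
          rw [this]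

theorem main_eq (p : String) : solution p = solution_alt p := by
  rw [solution_eq_loopF]
  obtain ⟨h1, -, -⟩ := fold_inv p.toList p.toList.length (le_refl _)
  rw [h1]
  set l := p.toList with hl
  set kL := (l.takeWhile (fun c => c == '<')).length with hkL
  set kR := (l.reverse.takeWhile (fun c => c != '<')).length with hkR
  have haL : kL ≤ l.length := (List.takeWhile_sublist _).length_le
  have haR : kR ≤ l.length := by
    have := (List.takeWhile_sublist (l := l.reverse) (fun c => c != '<')).length_le
    simpa using this
  have hPfact : ∀ j (hj : j < l.length), j < kL → l[j]'hj = '<' := by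
    intro j hj hjk
    have htake : (l.take kL).all (fun c => c == '<') = true :=
      (take_all_iff_takeWhile _ l kL haL).2 (le_refl _)
    have := (all_take_iff _ l kL).1 htake j hj hjk
    simpa using this
  have hQfact : ∀ j (hj : j < l.length), l.length - kR ≤ j → l[j]'hj ≠ '<' := by
    intro j hj hjk
    have htake : (l.reverse.take kR).all (fun c => c != '<') = true :=
      (take_all_iff_takeWhile _ l.reverse kR (by simpa using haR)).2 (le_refl _)
    have hdrop : (l.drop (l.length - kR)).all (fun c => c != '<') = true := by
      rw [← List.all_reverse, List.reverse_drop]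
      have : l.length - (l.length - kR) = kR := by omega
      rw [this]
      exact htake
    have := (all_drop_iff _ l (l.length - kR)).1 hdrop j hj hjk
    simpa using this
  have hd : kL + kR ≤ l.length := by
    by_contra hcon
    have hkL0 : 0 < kL := by omega
    have hj1 : kL - 1 < l.length := by omega
    have := hPfact (kL - 1) hj1 (by omega)
    have := hQfact (kL - 1) hj1 (by omega)
    contradiction
  have hcount : (List.range l.length).countP (fun j => escB l j) = kL + kR := by
    have hcongr : ∀ j ∈ List.range l.length,
        (escB l j = true ↔ (decide (j < kL) || decide (l.length - kR ≤ j)) = true) := by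
      intro j hj
      rw [List.mem_range] at hj
      rw [escB_eq l j hj]
    rw [List.countP_congr hcongr]
    exact count_two_runs l.length kL kR haL haR hd
  rw [hcount]
  unfold solution_alt
  rw [leadRun_eq, trailRun_eq]
  rw [← hl, ← hkL, ← hkR]
  push_cast; ring

-- ===== VERDICT (by name: the statement is the Claim_ definition above) =====
theorem solution_spec : Claim_equal_solution := by
  intro p _
  show solution p = solution_alt p
  exact main_eq p
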